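-- pv_equiv track=rewrite | github.com/mlimarenko/RustRAG | apps/api/benchmarks/grounded_query/compare_benchmarks.py | count_dimensions
-- ===== SOURCE A (Python) =====
-- def count_dimensions(cases: list) -> dict:
--     """Count pass/fail per dimension across all cases."""
--     dims = {}
--     for case in cases:
--         for dim_name, dim_val in case.get("dimensions", {}).items():
--             if dim_name not in dims:
--                 dims[dim_name] = {"pass": 0, "fail": 0}
--             if dim_val.get("pass"):
--                 dims[dim_name]["pass"] += 1
--             else:
--                 dims[dim_name]["fail"] += 1
--     return dims
-- ===== SOURCE B (Python) =====
-- def count_dimensions(cases: list) -> dict: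
--     """Count pass/fail per dimension across all cases (group-then-reduce)."""
--     groups = {}
--     for case in cases:
--         for dim_name, dim_val in case.get("dimensions", {}).items():
--             groups.setdefault(dim_name, []).append(bool(dim_val.get("pass")))
--     return {name: {"pass": sum(vals), "fail": len(vals) - sum(vals)}
--             for name, vals in groups.items()}
-- ===== Notes on version B (the rewrite author's own statement) =====
-- stated objective: alternative
-- what changed: Replaces A's incremental per-dimension pass/fail counters with a two-phase group-then-reduce: first gather each dimension's booleans into an ordered grouping dict, then a comprehension turns each group into its pass/fail counts.
import Mathlib
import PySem

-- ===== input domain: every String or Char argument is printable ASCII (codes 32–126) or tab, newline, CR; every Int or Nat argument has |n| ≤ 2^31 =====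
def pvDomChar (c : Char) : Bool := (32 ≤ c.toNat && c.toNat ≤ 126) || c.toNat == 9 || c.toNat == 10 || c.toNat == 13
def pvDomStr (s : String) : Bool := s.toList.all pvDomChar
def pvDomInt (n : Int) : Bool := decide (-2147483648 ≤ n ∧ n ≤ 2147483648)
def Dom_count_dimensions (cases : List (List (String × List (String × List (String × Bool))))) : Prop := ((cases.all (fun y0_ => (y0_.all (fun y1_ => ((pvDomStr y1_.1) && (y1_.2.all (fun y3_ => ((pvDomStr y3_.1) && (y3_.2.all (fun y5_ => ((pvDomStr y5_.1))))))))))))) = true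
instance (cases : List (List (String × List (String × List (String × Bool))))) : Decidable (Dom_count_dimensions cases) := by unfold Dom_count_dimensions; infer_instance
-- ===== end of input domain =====

-- B replaces A's incremental per-dimension pass/fail counters with a group-then-reduce
-- decomposition (gather booleans per dimension, then turn each group into counts); same cost.

-- ===== PORT A =====
-- shared dict-reading helpers (both Pythons evaluate exactly these expressions):
-- the items of the dict 'case.get("dimensions", {})' (dict values arrive as assoc lists;
-- PySem.Dict.ofList rebuilds the Python dict: first-occurrence position, last value)
def pvDims (case_ : List (String × List (String × List (String × Bool)))) :
    List (String × List (String × Bool)) :=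
  (PySem.Dict.ofList ((PySem.Dict.ofList case_).getD "dimensions" [])).items
-- truthiness of 'dim_val.get("pass")' (None and False are both falsy)
def pvPass (dv : List (String × Bool)) : Bool :=
  (PySem.Dict.ofList dv).getD "pass" false

def count_dimensions (cases : List (List (String × List (String × List (String × Bool))))) : List (String × List (String × Int)) :=
  let dims : PySem.Dict String (PySem.Dict String Int) :=
    cases.foldl (fun dims case_ =>
      (pvDims case_).foldl (fun dims p =>
        let dims := if dims.contains p.1 then dims
                    else dims.insert p.1 (PySem.Dict.ofList [("pass", (0 : Int)), ("fail", (0 : Int))])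
        -- dims[dim_name]["pass"] += 1  (key p.1 is present here, so modify is exact)
        if pvPass p.2 then dims.modify p.1 PySem.Dict.empty (fun inn => inn.modify "pass" 0 (· + 1))
        else dims.modify p.1 PySem.Dict.empty (fun inn => inn.modify "fail" 0 (· + 1))) dims)
      PySem.Dict.empty
  dims.items.map (fun kv => (kv.1, kv.2.items))

-- ===== PORT B =====
def count_dimensions_alt (cases : List (List (String × List (String × List (String × Bool))))) : List (String × List (String × Int)) :=
  let groups : PySem.Dict String (List Bool) :=
    cases.foldl (fun g case_ =>
      (pvDims case_).foldl (fun g p => g.modify p.1 [] (· ++ [pvPass p.2])) g)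
      PySem.Dict.empty
  groups.items.map (fun kv =>
    (kv.1, [("pass", (kv.2.count true : Int)),
            ("fail", (kv.2.length : Int) - (kv.2.count true : Int))]))

-- ===== PRECONDITION & SPEC =====
def Spec_count_dimensions (cases : List (List (String × List (String × List (String × Bool))))) (out : List (String × List (String × Int))) : Prop := out = count_dimensions_alt cases
instance (cases : List (List (String × List (String × List (String × Bool))))) (out : List (String × List (String × Int))) : Decidable (Spec_count_dimensions cases out) := by unfold Spec_count_dimensions; infer_instance

-- ===== CLAIM (what is proved, stated in full; the proofs are below) =====
def Claim_equal_count_dimensions : Prop := ∀ (cases : List (List (String × List (String × List (String × Bool))))), Dom_count_dimensions cases → Spec_count_dimensions cases (count_dimensions cases)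

-- ===== LEMMAS AND PROOFS =====

-- d.modify is d.insert of the updated value (definitional; stated so rw can use it)
lemma modify_eq_insert {κ ν : Type} [BEq κ] (d : PySem.Dict κ ν) (k : κ) (d0 : ν) (f : ν → ν) :
    d.modify k d0 f = d.insert k (f (d.getD k d0)) := rfl

-- B's group of booleans, reduced to A's inner counter dict
def pvSumm (vals : List Bool) : PySem.Dict String Int :=
  PySem.Dict.mk [("pass", (vals.count true : Int)),
                 ("fail", (vals.length : Int) - (vals.count true : Int))]

-- A's whole counter state, reconstructed from B's grouping state
def pvF (g : PySem.Dict String (List Bool)) : PySem.Dict String (PySem.Dict String Int) :=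
  PySem.Dict.mk (g.items.map (fun kv => (kv.1, pvSumm kv.2)))

lemma pvF_keys (g : PySem.Dict String (List Bool)) : (pvF g).keys = g.keys := by
  simp [pvF, PySem.Dict.keys]

lemma pvF_contains (g : PySem.Dict String (List Bool)) (k : String) :
    (pvF g).contains k = g.contains k := by
  simp [PySem.Dict.contains_eq_decide_mem_keys, pvF_keys]

lemma pvSumm_step (vals : List Bool) (b : Bool) :
    pvSumm (vals ++ [b]) =
      (if b then (pvSumm vals).modify "pass" 0 (· + 1)
       else (pvSumm vals).modify "fail" 0 (· + 1)) := by
  cases b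
  · simp [pvSumm, PySem.Dict.modify, PySem.Dict.insert, PySem.Dict.getD, PySem.Dict.get?,
      List.count_append]
    ring_nf
  · simp [pvSumm, PySem.Dict.modify, PySem.Dict.insert, PySem.Dict.getD, PySem.Dict.get?,
      List.count_append]

lemma pvF_insert (g : PySem.Dict String (List Bool)) (k : String) (w : List Bool) :
    (pvF g).insert k (pvSumm w) = pvF (g.insert k w) := by
  apply PySem.Dict.ext
  by_cases hc : g.contains k = true
  · have hcF : (pvF g).contains k = true := by rw [pvF_contains]; exact hc
    rw [PySem.Dict.items_insert_of_contains _ _ hcF]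
    simp only [pvF, PySem.Dict.items_insert_of_contains g _ hc, List.map_map]
    apply List.map_congr_left
    intro p _
    by_cases hp : p.1 = k <;> simp [Function.comp, hp]
  · have hc' : g.contains k = false := by simpa using hc
    have hcF : (pvF g).contains k = false := by rw [pvF_contains]; exact hc'
    rw [PySem.Dict.items_insert_of_not_contains _ _ hcF]
    simp [pvF, PySem.Dict.items_insert_of_not_contains g _ hc']

lemma pvStep (g : PySem.Dict String (List Bool)) (hnd : g.keys.Nodup) (k : String) (b : Bool) :
    (let d := if (pvF g).contains k then pvF g
              else (pvF g).insert k (PySem.Dict.ofList [("pass", (0 : Int)), ("fail", (0 : Int))]);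
     if b then d.modify k PySem.Dict.empty (fun inn => inn.modify "pass" 0 (· + 1))
     else d.modify k PySem.Dict.empty (fun inn => inn.modify "fail" 0 (· + 1)))
    = pvF (g.modify k [] (· ++ [b])) := by
  rw [modify_eq_insert g, ← pvF_insert]
  by_cases hc : g.contains k = true
  · -- dimension already seen: both sides overwrite the existing entry in place
    have hcF : (pvF g).contains k = true := by rw [pvF_contains]; exact hc
    have hvm : (k, g.getD k []) ∈ g.items := by
      have hs : g.get? k = some (g.getD k []) := by
        have hsome : (g.get? k).isSome := by
          rw [← PySem.Dict.contains_eq_isSome_get?]; exact hc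
        rcases Option.isSome_iff_exists.mp hsome with ⟨v, hv⟩
        rw [hv, PySem.Dict.getD_of_get?_eq_some g [] hv]
      exact (PySem.Dict.get?_eq_some_iff_mem_items g k _ hnd).mp hs
    have hFg : (pvF g).getD k PySem.Dict.empty = pvSumm (g.getD k []) := by
      refine PySem.Dict.getD_of_mem_items (pvF g) ?_ (by rw [pvF_keys]; exact hnd) PySem.Dict.empty
      exact List.mem_map.mpr ⟨(k, g.getD k []), hvm, rfl⟩
    simp only [hcF, if_true]
    rw [pvSumm_step]
    cases b <;> simp only [if_true, if_false, Bool.false_eq_true] <;>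
      rw [modify_eq_insert, hFg]
  · -- fresh dimension: both sides append a new entry at the end
    have hc' : g.contains k = false := by simpa using hc
    have hcF : (pvF g).contains k = false := by rw [pvF_contains]; exact hc'
    have hg0 : g.getD k [] = [] := PySem.Dict.getD_of_not_contains g [] hc'
    simp only [hcF, Bool.false_eq_true, if_false, hg0]
    cases b <;> simp only [if_true, if_false, Bool.false_eq_true] <;>
      rw [modify_eq_insert, PySem.Dict.getD_insert_self, PySem.Dict.insert_insert_self]  <;>
      congr 1

lemma pvInner (ds : List (String × List (String × Bool)))
    (g : PySem.Dict String (List Bool)) (hnd : g.keys.Nodup) :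
    ds.foldl (fun dims p =>
        let dims := if dims.contains p.1 then dims
                    else dims.insert p.1 (PySem.Dict.ofList [("pass", (0 : Int)), ("fail", (0 : Int))])
        if pvPass p.2 then dims.modify p.1 PySem.Dict.empty (fun inn => inn.modify "pass" 0 (· + 1))
        else dims.modify p.1 PySem.Dict.empty (fun inn => inn.modify "fail" 0 (· + 1))) (pvF g)
    = pvF (ds.foldl (fun g p => g.modify p.1 [] (· ++ [pvPass p.2])) g) := by
  induction ds generalizing g with
  | nil => rfl
  | cons p ds ih =>
    simp only [List.foldl_cons]
    rw [pvStep g hnd p.1 (pvPass p.2)]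
    exact ih _ (by
      rw [PySem.Dict.keys_modify]
      exact PySem.Dict.nodup_keys_insert g _ _ hnd)

lemma pvNodupInner (ds : List (String × List (String × Bool)))
    (g : PySem.Dict String (List Bool)) (hnd : g.keys.Nodup) :
    (ds.foldl (fun g p => g.modify p.1 [] (· ++ [pvPass p.2])) g).keys.Nodup := by
  induction ds generalizing g with
  | nil => exact hnd
  | cons p ds ih =>
    simp only [List.foldl_cons]
    exact ih _ (by
      rw [PySem.Dict.keys_modify]
      exact PySem.Dict.nodup_keys_insert g _ _ hnd)

lemma pvOuter (cases : List (List (String × List (String × List (String × Bool)))))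
    (g : PySem.Dict String (List Bool)) (hnd : g.keys.Nodup) :
    cases.foldl (fun dims case_ =>
      (pvDims case_).foldl (fun dims p =>
        let dims := if dims.contains p.1 then dims
                    else dims.insert p.1 (PySem.Dict.ofList [("pass", (0 : Int)), ("fail", (0 : Int))])
        if pvPass p.2 then dims.modify p.1 PySem.Dict.empty (fun inn => inn.modify "pass" 0 (· + 1))
        else dims.modify p.1 PySem.Dict.empty (fun inn => inn.modify "fail" 0 (· + 1))) dims) (pvF g)
    = pvF (cases.foldl (fun g case_ =>
        (pvDims case_).foldl (fun g p => g.modify p.1 [] (· ++ [pvPass p.2])) g) g) := by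
  induction cases generalizing g with
  | nil => rfl
  | cons c cs ih =>
    simp only [List.foldl_cons]
    rw [pvInner (pvDims c) g hnd]
    exact ih _ (pvNodupInner _ g hnd)

-- ===== VERDICT (by name: the statement is the Claim_ definition above) =====
theorem count_dimensions_spec : Claim_equal_count_dimensions := by
  intro cases _
  show count_dimensions cases = count_dimensions_alt cases
  unfold count_dimensions count_dimensions_alt
  have h0 : (PySem.Dict.empty : PySem.Dict String (PySem.Dict String Int)) = pvF PySem.Dict.empty := rfl
  rw [h0, pvOuter cases PySem.Dict.empty (by simp [PySem.Dict.keys_empty])]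
  simp [pvF, pvSumm, List.map_map, Function.comp]
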